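-- pv_equiv track=rewrite | github.com/dafnesvc/IA | Logica/Representación del Conocimiento/3.4.7_Logica_R.C._SE.py | sistema_experto
-- ===== SOURCE A (Python) =====
-- base_conocimiento = [
--     ("tiene_fiebre", "tiene_gripe"),
--     ("tiene_tos", "tiene_gripe"),
--     ("tiene_fiebre", "tomar_paracetamol"),
--     ("tiene_tos", "tomar_jarabe"),
-- ]
--
-- def sistema_experto(sintomas):
--     diagnostico = set()
--     recomendaciones = set()
--
--     # Aplicamos las reglas de la base de conocimiento
--     for condicion, conclusion in base_conocimiento:
--         if condicion in sintomas:
--             diagnostico.add(conclusion)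
--             if conclusion.startswith("tomar_"):
--                 recomendaciones.add(conclusion.replace("tomar_", "").replace("_", " "))
--
--     return diagnostico, recomendaciones
-- ===== SOURCE B (Python) =====
-- # B: the rule base is a fixed constant, so B is the partially-evaluated expert
-- # system: it tests the two possible antecedents directly and assembles the
-- # result sets by case analysis, with no loop over rules at all.
-- def sistema_experto(sintomas):
--     fiebre = "tiene_fiebre" in sintomas
--     tos = "tiene_tos" in sintomas
--     diagnostico = set()
--     recomendaciones = set()
--     if fiebre or tos:
--         diagnostico.add("tiene_gripe")
--     if fiebre:
--         diagnostico.add("tomar_paracetamol")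
--         recomendaciones.add("paracetamol")
--     if tos:
--         diagnostico.add("tomar_jarabe")
--         recomendaciones.add("jarabe")
--     return diagnostico, recomendaciones
-- ===== Notes on version B (the rewrite author's own statement) =====
-- stated objective: alternative
-- what changed: B is the partial evaluation of A's rule interpreter over the constant rule base: instead of looping over base_conocimiento and matching antecedents, it tests once for each of the two antecedent symptoms that occur in the rules and assembles the diagnosis and recommendation sets by direct case analysis, with no rule loop and no string prefix/replace processing at run time.
import Mathlib
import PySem

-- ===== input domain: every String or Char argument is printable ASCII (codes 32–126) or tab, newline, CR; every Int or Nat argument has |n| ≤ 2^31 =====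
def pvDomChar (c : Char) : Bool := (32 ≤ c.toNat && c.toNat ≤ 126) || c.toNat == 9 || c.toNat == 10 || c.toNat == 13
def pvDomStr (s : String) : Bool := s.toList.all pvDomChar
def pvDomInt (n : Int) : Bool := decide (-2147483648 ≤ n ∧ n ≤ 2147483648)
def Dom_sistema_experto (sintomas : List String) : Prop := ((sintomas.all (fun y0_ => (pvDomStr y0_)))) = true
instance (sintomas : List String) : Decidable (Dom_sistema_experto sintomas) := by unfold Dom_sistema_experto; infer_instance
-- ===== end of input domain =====

-- B is the partial evaluation of A's rule interpreter over the constant rule base: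
-- it tests the two possible symptoms directly and builds both sets by case analysis,
-- with no loop over rules and no run-time string processing.

-- ===== PORT A =====
def base_conocimiento : List (String × String) :=
  [("tiene_fiebre", "tiene_gripe"),
   ("tiene_tos", "tiene_gripe"),
   ("tiene_fiebre", "tomar_paracetamol"),
   ("tiene_tos", "tomar_jarabe")]

def sistema_experto (sintomas : List String) : List String × List String :=
  base_conocimiento.foldl
    (fun (st : PySem.Set String × PySem.Set String) cr =>
      let condicion := cr.1
      let conclusion := cr.2
      if sintomas.contains condicion then
        let diagnostico := PySem.Set.add st.1 conclusion
        let recomendaciones :=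
          if PySem.Str.startswith conclusion "tomar_" then
            PySem.Set.add st.2
              (PySem.Str.replace (PySem.Str.replace conclusion "tomar_" "") "_" " ")
          else st.2
        (diagnostico, recomendaciones)
      else st)
    (PySem.Set.empty, PySem.Set.empty)

-- ===== PORT B =====
def sistema_experto_alt (sintomas : List String) : List String × List String :=
  let fiebre := sintomas.contains "tiene_fiebre"
  let tos := sintomas.contains "tiene_tos"
  let d0 : PySem.Set String := PySem.Set.empty
  let d1 := if fiebre || tos then PySem.Set.add d0 "tiene_gripe" else d0
  let r0 : PySem.Set String := PySem.Set.empty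
  let d2 := if fiebre then PySem.Set.add d1 "tomar_paracetamol" else d1
  let r1 := if fiebre then PySem.Set.add r0 "paracetamol" else r0
  let d3 := if tos then PySem.Set.add d2 "tomar_jarabe" else d2
  let r2 := if tos then PySem.Set.add r1 "jarabe" else r1
  (d3, r2)

-- ===== PRECONDITION & SPEC =====
def Spec_sistema_experto (sintomas : List String) (out : List String × List String) : Prop := out = sistema_experto_alt sintomas
instance (sintomas : List String) (out : List String × List String) : Decidable (Spec_sistema_experto sintomas out) := by unfold Spec_sistema_experto; infer_instance

-- ===== CLAIM (what is proved, stated in full; the proofs are below) =====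
def Claim_equal_sistema_experto : Prop := ∀ (sintomas : List String), Dom_sistema_experto sintomas → Spec_sistema_experto sintomas (sistema_experto sintomas)

-- ===== LEMMAS AND PROOFS =====

-- ===== VERDICT (by name: the statement is the Claim_ definition above) =====
theorem sistema_experto_spec : Claim_equal_sistema_experto := by
  intro s _
  unfold Spec_sistema_experto
  by_cases h1 : "tiene_fiebre" ∈ s <;> by_cases h2 : "tiene_tos" ∈ s <;>
    simp only [sistema_experto, sistema_experto_alt, base_conocimiento, List.foldl,
      List.contains_eq_mem, h1, h2, decide_true, decide_false, if_true, if_false] <;> decide
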